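-- pv_equiv track=rewrite | github.com/pypi-data/pypi-mirror-365 | packages/personnel_matching_data_process_algo_v2/personnel_matching_data_process_algo_v2-0.0.1b8.tar.gz/personnel_matching_data_process_algo_v2-0.0.1b8/src/auto_teacher_process/utils/name_utils.py | split_surname
-- ===== SOURCE A (Python) =====
-- def split_surname(name_parts):
--     name_variants = []
--     n = len(name_parts)
--     # 2. 枚举姓氏：前缀或后缀连续的 1 ~ n-1 个单词作为姓氏
--     for i in range(1, n):  # i 表示姓氏的单词数量
--         # 前缀作为姓氏
--         prefix_surname = " ".join(name_parts[:i])  # 从头开始取 i 个单词作为姓氏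
--         first_name = " ".join(name_parts[i:])  # 剩余部分为名字
--         if first_name:
--             name_variants.append(f"[{prefix_surname}] {first_name}")  # 添加结果
--
--         # 后缀作为姓氏
--         suffix_surname = " ".join(name_parts[-i:])  # 从末尾开始取 i 个单词作为姓氏
--         first_name = " ".join(name_parts[:-i])  # 剩余部分为名字
--         if first_name:
--             name_variants.append(f"[{suffix_surname}] {first_name}")  # 添加结果
--
--     return sorted(set(name_variants))  # 去重并排序
-- ===== SOURCE B (Python) =====
-- def split_surname(name_parts):
--     # Two linear passes with running accumulators instead of per-index slicing+joining:
--     # a reverse pass precomputes every suffix join, then a forward pass grows the prefix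
--     # join one word at a time, pairing it with the matching suffix and emitting both
--     # "[surname] firstname" orderings; dedupe in a set, then sort.
--     suffixes = []
--     acc = None
--     for w in reversed(name_parts):
--         acc = w if acc is None else w + " " + acc
--         suffixes.append(acc)
--     suffixes.reverse()
--     variants = set()
--     left = None
--     for w, right in zip(name_parts, suffixes[1:]):
--         left = w if left is None else left + " " + w
--         if right:
--             variants.add(f"[{left}] {right}")
--         if left:
--             variants.add(f"[{right}] {left}")
--     return sorted(variants)
-- ===== Notes on version B (the rewrite author's own statement) =====
-- stated objective: alternative
-- what changed: A recomputes each surname/first-name half from scratch with end-anchored slices and joins per surname length; B replaces the slice+join-per-index scheme by two staged linear passes with running accumulators: a reverse pass that precomputes every suffix join, then a forward pass that grows the prefix join word by word and zips it with the matching suffix, emitting both orderings into a set that is then sorted.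
import Mathlib
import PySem

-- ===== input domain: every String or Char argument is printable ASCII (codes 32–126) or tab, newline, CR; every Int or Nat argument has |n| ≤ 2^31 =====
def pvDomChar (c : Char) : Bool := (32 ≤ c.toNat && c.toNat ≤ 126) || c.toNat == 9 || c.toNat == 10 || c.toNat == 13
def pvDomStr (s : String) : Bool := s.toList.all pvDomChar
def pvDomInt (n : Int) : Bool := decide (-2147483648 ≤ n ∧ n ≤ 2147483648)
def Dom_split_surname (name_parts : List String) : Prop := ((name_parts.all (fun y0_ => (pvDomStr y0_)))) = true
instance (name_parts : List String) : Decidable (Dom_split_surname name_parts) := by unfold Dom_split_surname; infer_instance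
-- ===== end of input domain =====

-- B replaces A's per-index slice+join recomputation by two staged linear passes with running
-- accumulators (a reverse suffix-join pass, then a forward prefix-growing pass over the zip)
-- (objective: alternative).

-- ===== PORT A =====
def split_surname (name_parts : List String) : List String :=
  let n : Int := PySem.List.len name_parts
  let name_variants : List String :=
    (PySem.List.pyRange 1 n 1).foldl (fun acc i =>
      let prefix_surname := PySem.Str.join " " (PySem.List.slice name_parts none (some i))
      let first_name := PySem.Str.join " " (PySem.List.slice name_parts (some i) none)
      let acc := if first_name ≠ "" then acc ++ ["[" ++ prefix_surname ++ "] " ++ first_name] else acc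
      let suffix_surname := PySem.Str.join " " (PySem.List.slice name_parts (some (-i)) none)
      let first_name2 := PySem.Str.join " " (PySem.List.slice name_parts none (some (-i)))
      if first_name2 ≠ "" then acc ++ ["[" ++ suffix_surname ++ "] " ++ first_name2] else acc) []
  PySem.List.sorted (PySem.Set.ofList name_variants) (fun x => x) false

-- ===== PORT B =====
-- 'acc = w if acc is None else w + " " + acc' (B's reverse pass conditional)
def pvGrowR (o : Option String) (w : String) : String :=
  match o with | none => w | some a => w ++ " " ++ a

-- 'left = w if left is None else left + " " + w' (B's forward pass conditional)
def pvGrowL (o : Option String) (w : String) : String :=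
  match o with | none => w | some a => a ++ " " ++ w

-- the body of B's reverse pass: extend the running suffix join by one word and record it
def pvStep1 (st : List String × Option String) (w : String) : List String × Option String :=
  let acc := pvGrowR st.2 w
  (st.1 ++ [acc], some acc)

-- the body of B's forward pass: grow the prefix join and emit both orderings into the set
def pvStep2 (st : Option String × PySem.Set String) (p : String × String) :
    Option String × PySem.Set String :=
  let left := pvGrowL st.1 p.1
  let v := if p.2 ≠ "" then PySem.Set.add st.2 ("[" ++ left ++ "] " ++ p.2) else st.2
  let v2 := if left ≠ "" then PySem.Set.add v ("[" ++ p.2 ++ "] " ++ left) else v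
  (some left, v2)

def split_surname_alt (name_parts : List String) : List String :=
  let suffixes := (name_parts.reverse.foldl pvStep1 ([], none)).1
  let suffixes := suffixes.reverse
  let res := (name_parts.zip (PySem.List.slice suffixes (some 1) none)).foldl
      pvStep2 (none, (PySem.Set.empty : PySem.Set String))
  PySem.List.sorted res.2 (fun x => x) false

-- ===== PRECONDITION & SPEC =====
def Spec_split_surname (name_parts : List String) (out : List String) : Prop := out = split_surname_alt name_parts
instance (name_parts : List String) (out : List String) : Decidable (Spec_split_surname name_parts out) := by unfold Spec_split_surname; infer_instance

-- ===== CLAIM (what is proved, stated in full; the proofs are below) =====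
def Claim_equal_split_surname : Prop := ∀ (name_parts : List String), Dom_split_surname name_parts → Spec_split_surname name_parts (split_surname name_parts)

-- ===== LEMMAS AND PROOFS =====

-- shorthand for the space join
def pvJ (xs : List String) : String := PySem.Str.join " " xs

def pvOptJ : List String → Option String
  | [] => none
  | x :: xs => some (pvJ (x :: xs))

theorem pvOptJ_ne_nil (xs : List String) (h : xs ≠ []) : pvOptJ xs = some (pvJ xs) := by
  cases xs with
  | nil => exact absurd rfl h
  | cons x t => rfl

theorem pvOfListSpace (J : List Char) : String.ofList (' ' :: J) = " " ++ String.ofList J := by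
  rw [show (' ' :: J) = [' '] ++ J from rfl, String.ofList_append]

theorem pvJ_singleton (w : String) : pvJ [w] = w := by simp [pvJ, PySem.Str.join]

theorem pvJ_cons (w : String) (xs : List String) (h : xs ≠ []) :
    pvJ (w :: xs) = w ++ " " ++ pvJ xs := by
  cases xs with
  | nil => exact absurd rfl h
  | cons x t =>
    simp [pvJ, PySem.Str.join, PySem.Chars.join_cons_cons, String.ofList_append,
      String.ofList_toList, String.append_assoc, pvOfListSpace]

theorem pvJ_snoc (xs : List String) (w : String) (h : xs ≠ []) :
    pvJ (xs ++ [w]) = pvJ xs ++ " " ++ w := by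
  induction xs with
  | nil => exact absurd rfl h
  | cons x t ih =>
    cases t with
    | nil => simp [pvJ_cons x [w] (by simp), pvJ_singleton]
    | cons y s =>
      rw [List.cons_append, pvJ_cons x ((y :: s) ++ [w]) (by simp),
        ih (by simp), pvJ_cons x (y :: s) (by simp)]
      simp [String.append_assoc]

theorem pvGrowR_optJ (xs : List String) (w : String) :
    pvGrowR (pvOptJ xs) w = pvJ (w :: xs) := by
  cases xs with
  | nil => simp [pvGrowR, pvOptJ, pvJ_singleton]
  | cons a as =>
    simp only [pvGrowR, pvOptJ]
    rw [pvJ_cons w (a :: as) (by simp)]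

theorem pvGrowL_optJ (xs : List String) (w : String) :
    pvGrowL (pvOptJ xs) w = pvJ (xs ++ [w]) := by
  cases xs with
  | nil => simp [pvGrowL, pvOptJ, pvJ_singleton]
  | cons a as =>
    simp only [pvGrowL, pvOptJ]
    rw [pvJ_snoc (a :: as) w (by simp)]

-- the variant strings emitted at split point k
def pvItemP (parts : List String) (k : Nat) : List String :=
  if pvJ (parts.drop k) ≠ "" then
    ["[" ++ pvJ (parts.take k) ++ "] " ++ pvJ (parts.drop k)] else []

def pvItemS (parts : List String) (k : Nat) : List String :=
  if pvJ (parts.take k) ≠ "" then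
    ["[" ++ pvJ (parts.drop k) ++ "] " ++ pvJ (parts.take k)] else []

-- ===== A-side characterization =====
def pvPItem (parts : List String) (i : Int) : List String :=
  if PySem.Str.join " " (PySem.List.slice parts (some i) none) ≠ "" then
    ["[" ++ PySem.Str.join " " (PySem.List.slice parts none (some i)) ++ "] "
       ++ PySem.Str.join " " (PySem.List.slice parts (some i) none)]
  else []

def pvSItemA (parts : List String) (i : Int) : List String :=
  if PySem.Str.join " " (PySem.List.slice parts none (some (-i))) ≠ "" then
    ["[" ++ PySem.Str.join " " (PySem.List.slice parts (some (-i)) none) ++ "] "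
       ++ PySem.Str.join " " (PySem.List.slice parts none (some (-i)))]
  else []

theorem pvFoldA (parts : List String) (l : List Int) (acc : List String) :
    l.foldl (fun acc i =>
      let prefix_surname := PySem.Str.join " " (PySem.List.slice parts none (some i))
      let first_name := PySem.Str.join " " (PySem.List.slice parts (some i) none)
      let acc := if first_name ≠ "" then acc ++ ["[" ++ prefix_surname ++ "] " ++ first_name] else acc
      let suffix_surname := PySem.Str.join " " (PySem.List.slice parts (some (-i)) none)
      let first_name2 := PySem.Str.join " " (PySem.List.slice parts none (some (-i)))
      if first_name2 ≠ "" then acc ++ ["[" ++ suffix_surname ++ "] " ++ first_name2] else acc) acc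
    = acc ++ l.flatMap (fun i => pvPItem parts i ++ pvSItemA parts i) := by
  induction l generalizing acc with
  | nil => simp
  | cons a t ih =>
    simp only [List.foldl_cons, List.flatMap_cons, ih, pvPItem, pvSItemA]
    split_ifs <;> simp

theorem pvPItem_eq (parts : List String) (k : Nat) :
    pvPItem parts (k : Int) = pvItemP parts k := by
  unfold pvPItem pvItemP pvJ
  rw [PySem.List.slice_from_natCast, PySem.List.slice_to_natCast]

theorem pvSItemA_eq (parts : List String) (k : Nat) (hk : 0 < k) :
    pvSItemA parts (k : Int) = pvItemS parts (parts.length - k) := by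
  unfold pvSItemA pvItemS pvJ
  rw [PySem.List.slice_from_neg_natCast parts k hk, PySem.List.slice_to_neg_natCast parts k hk]

theorem pvMemA (parts : List String) (x : String) :
    (x ∈ (PySem.List.pyRange 1 (parts.length : Int) 1).flatMap
        (fun i => pvPItem parts i ++ pvSItemA parts i))
    ↔ ∃ k : Nat, 1 ≤ k ∧ k < parts.length ∧ (x ∈ pvItemP parts k ∨ x ∈ pvItemS parts k) := by
  simp only [List.mem_flatMap, List.mem_append, PySem.List.mem_pyRange_one]
  constructor
  · rintro ⟨i, ⟨h1, h2⟩, hx | hx⟩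
    · refine ⟨i.toNat, by omega, by omega, Or.inl ?_⟩
      have hi : ((i.toNat : Nat) : Int) = i := by omega
      rwa [← hi, pvPItem_eq] at hx
    · refine ⟨parts.length - i.toNat, by omega, by omega, Or.inr ?_⟩
      have hi : ((i.toNat : Nat) : Int) = i := by omega
      rw [← hi, pvSItemA_eq parts i.toNat (by omega)] at hx
      exact hx
  · rintro ⟨k, hk1, hk2, hx | hx⟩
    · exact ⟨(k : Int), ⟨by omega, by omega⟩, Or.inl (by rwa [pvPItem_eq])⟩
    · refine ⟨((parts.length - k : Nat) : Int), ⟨by omega, by omega⟩, Or.inr ?_⟩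
      rw [pvSItemA_eq parts (parts.length - k) (by omega)]
      have h : parts.length - (parts.length - k) = k := by omega
      rwa [h]

-- ===== B-side characterization =====
-- the list of suffix joins B's reverse pass produces: [join(parts[k:]) for k in range(n)]
def pvSfx (parts : List String) : List String :=
  (List.range parts.length).map (fun k => pvJ (parts.drop k))

theorem pvRevTakeRev {α : Type} (l : List α) (m : Nat) :
    (l.reverse.take m).reverse = l.drop (l.length - m) := by
  rw [List.reverse_take, List.reverse_reverse, List.length_reverse]

theorem pvSufFold (l : List String) :
    l.foldl pvStep1 ([], none)
      = ((List.range l.length).map (fun j => pvJ ((l.take (j+1)).reverse)), pvOptJ l.reverse) := by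
  induction l using List.reverseRecOn with
  | nil => simp [pvOptJ]
  | append_singleton t w ih =>
    rw [List.foldl_append, ih]
    simp only [List.foldl_cons, List.foldl_nil, pvStep1]
    rw [pvGrowR_optJ]
    have h1 : (t ++ [w]).reverse = w :: t.reverse := by simp
    rw [h1]
    refine Prod.ext ?_ ?_
    · simp only [List.length_append, List.length_singleton, List.range_succ, List.map_append,
        List.map_cons, List.map_nil]
      congr 1
      · exact List.map_congr_left (fun j hj => by
          rw [List.mem_range] at hj
          rw [List.take_append_of_le_length (by omega)])
      · rw [List.take_of_length_le (by simp), h1]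
    · simp [pvOptJ]

theorem pvSuffixes (parts : List String) :
    (parts.reverse.foldl pvStep1 ([], none)).1.reverse = pvSfx parts := by
  rw [pvSufFold]
  apply List.ext_getElem
  · simp [pvSfx]
  · intro k h1 h2
    simp only [List.length_reverse, List.length_map, List.length_range] at h1
    rw [List.getElem_reverse]
    simp only [pvSfx, List.getElem_map, List.getElem_range, List.length_map, List.length_range,
      List.length_reverse]
    rw [pvRevTakeRev]
    have hk : parts.length - (parts.length - 1 - k + 1) = k := by omega
    rw [hk]

theorem pvSfx_cons (w : String) (rest : List String) :
    pvSfx (w :: rest) = pvJ (w :: rest) :: pvSfx rest := by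
  simp only [pvSfx, List.length_cons, List.range_succ_eq_map, List.map_cons, List.drop_zero,
    List.map_map]
  refine congrArg₂ List.cons rfl ?_
  exact List.map_congr_left (fun a _ => by simp)

-- the two variant strings emitted at one split (prefix join L, suffix join r)
def pvItems (L r : String) : List String :=
  (if r ≠ "" then ["[" ++ L ++ "] " ++ r] else []) ++
  (if L ≠ "" then ["[" ++ r ++ "] " ++ L] else [])

-- the variants B emits, split point by split point, carrying the growing prefix join
def pvEmit : Option String → List String → List String
  | _, [] => []
  | _, [_] => []
  | l, w :: x :: t =>
      pvItems (pvGrowL l w) (pvJ (x :: t)) ++ pvEmit (some (pvGrowL l w)) (x :: t)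

theorem pvUpdateAppend (s : PySem.Set String) (a b : List String) :
    PySem.Set.update s (a ++ b) = PySem.Set.update (PySem.Set.update s a) b := by
  simp [PySem.Set.update, List.foldl_append]

theorem pvStep2_eq (l : Option String) (s : PySem.Set String) (w r : String) :
    pvStep2 (l, s) (w, r)
      = (some (pvGrowL l w), PySem.Set.update s (pvItems (pvGrowL l w) r)) := by
  simp only [pvStep2, pvItems]
  split_ifs <;> simp_all [PySem.Set.update]

theorem pvFold2 (parts : List String) (l : Option String) (s : PySem.Set String) :
    ((parts.zip ((pvSfx parts).tail)).foldl pvStep2 (l, s)).2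
      = PySem.Set.update s (pvEmit l parts) := by
  induction parts generalizing l s with
  | nil => simp [pvEmit, PySem.Set.update]
  | cons w rest ih =>
    cases rest with
    | nil => simp [pvEmit, pvSfx, PySem.Set.update]
    | cons x t =>
      rw [pvSfx_cons w (x :: t), List.tail_cons, pvSfx_cons x t, List.zip_cons_cons,
        List.foldl_cons, pvStep2_eq,
        show pvSfx t = (pvSfx (x :: t)).tail from by rw [pvSfx_cons x t, List.tail_cons],
        ih, show pvEmit l (w :: x :: t)
            = pvItems (pvGrowL l w) (pvJ (x :: t)) ++ pvEmit (some (pvGrowL l w)) (x :: t) from rfl,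
        pvUpdateAppend]

theorem pvTakeLen {α : Type} (pre : List α) (w : α) (rest : List α) :
    (pre ++ w :: rest).take (pre.length + 1) = pre ++ [w] := by
  induction pre with
  | nil => simp
  | cons a t ih => simp [List.take_succ_cons, ih]

theorem pvDropLen {α : Type} (pre : List α) (w : α) (rest : List α) :
    (pre ++ w :: rest).drop (pre.length + 1) = rest := by
  induction pre with
  | nil => simp
  | cons a t ih => simp [List.drop_succ_cons, ih]

theorem pvEmit_mem (parts : List String) : ∀ (pre : List String) (x : String),
    x ∈ pvEmit (pvOptJ pre) parts
      ↔ ∃ j : Nat, 1 ≤ j ∧ j < parts.length ∧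
          (x ∈ pvItemP (pre ++ parts) (pre.length + j) ∨ x ∈ pvItemS (pre ++ parts) (pre.length + j)) := by
  induction parts with
  | nil =>
    intro pre x
    simp only [pvEmit, List.not_mem_nil, false_iff, List.length_nil]
    rintro ⟨j, h1, h2, -⟩
    omega
  | cons w rest ih =>
    cases rest with
    | nil =>
      intro pre x
      simp only [pvEmit, List.not_mem_nil, false_iff, List.length_cons, List.length_nil]
      rintro ⟨j, h1, h2, -⟩
      omega
    | cons x' t =>
      intro pre x
      have hitem : pvItems (pvJ (pre ++ [w])) (pvJ (x' :: t))
          = pvItemP (pre ++ w :: x' :: t) (pre.length + 1)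
            ++ pvItemS (pre ++ w :: x' :: t) (pre.length + 1) := by
        simp only [pvItems, pvItemP, pvItemS, pvTakeLen, pvDropLen]
      have hLHS : x ∈ pvEmit (pvOptJ pre) (w :: x' :: t)
          ↔ (x ∈ pvItemP (pre ++ w :: x' :: t) (pre.length + 1)
              ∨ x ∈ pvItemS (pre ++ w :: x' :: t) (pre.length + 1))
            ∨ x ∈ pvEmit (pvOptJ (pre ++ [w])) (x' :: t) := by
        rw [show pvEmit (pvOptJ pre) (w :: x' :: t)
            = pvItems (pvGrowL (pvOptJ pre) w) (pvJ (x' :: t))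
              ++ pvEmit (some (pvGrowL (pvOptJ pre) w)) (x' :: t) from rfl,
          pvGrowL_optJ, ← pvOptJ_ne_nil (pre ++ [w]) (by simp), hitem,
          List.mem_append, List.mem_append]
      have hrec := ih (pre ++ [w]) x
      simp only [List.append_assoc, List.singleton_append, List.length_append,
        List.length_singleton] at hrec
      rw [hLHS, hrec]
      constructor
      · rintro (h | ⟨j', h1, h2, h3⟩)
        · exact ⟨1, le_refl 1, by simp, h⟩
        · refine ⟨j' + 1, by omega, ?_, ?_⟩
          · simp only [List.length_cons] at h2 ⊢
            omega
          · have harith : pre.length + (j' + 1) = pre.length + 1 + j' := by omega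
            rw [harith]
            exact h3
      · rintro ⟨j, h1, h2, h3⟩
        by_cases hj : j = 1
        · subst hj
          exact Or.inl h3
        · refine Or.inr ⟨j - 1, by omega, ?_, ?_⟩
          · simp only [List.length_cons] at h2 ⊢
            omega
          · have harith : pre.length + 1 + (j - 1) = pre.length + j := by omega
            rw [harith]
            exact h3

theorem pvMemB (parts : List String) (x : String) :
    x ∈ pvEmit none parts
      ↔ ∃ k : Nat, 1 ≤ k ∧ k < parts.length ∧ (x ∈ pvItemP parts k ∨ x ∈ pvItemS parts k) := by
  have h := pvEmit_mem parts [] x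
  simpa [pvOptJ] using h

theorem pvUpdateEmpty (xs : List String) :
    PySem.Set.update (PySem.Set.empty : PySem.Set String) xs = PySem.Set.ofList xs := by
  rw [PySem.Set.ofList_eq_foldl]
  rfl

-- ===== VERDICT (by name: the statement is the Claim_ definition above) =====
theorem split_surname_spec : Claim_equal_split_surname := by
  intro parts _
  unfold Spec_split_surname split_surname split_surname_alt
  simp only [PySem.List.len_eq, pvFoldA, List.nil_append, pvSuffixes,
    PySem.List.slice_from_one, pvFold2, pvUpdateEmpty]
  apply PySem.List.sorted_eq_sorted_of_perm _ _ _ (fun a b h => h)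
  apply (List.perm_ext_iff_of_nodup (PySem.Set.nodup_ofList _) (PySem.Set.nodup_ofList _)).mpr
  intro x
  rw [PySem.Set.mem_ofList, PySem.Set.mem_ofList]
  exact (pvMemA parts x).trans (pvMemB parts x).symm
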